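-- pv_equiv track=rewrite | github.com/mersad95zd/DNA_Project | include/lsh_clustering.py | kmerDNA
-- ===== SOURCE A (Python) =====
-- def kmerDNA(seq,k=4):
--     kmer = []
--     for ell in range(len(seq)-k+1):
--         nstr = seq[ell:ell+k]
--
--         index = 0
--         for j,c in enumerate(nstr):
--             if c == 'A':
--                 i = 0
--             elif c == 'C':
--                 i = 1
--             elif c == 'G':
--                 i = 2
--             elif c == 'T':
--                 i = 3
--             else:
--                 index = -1
--                 break
--             index += i*(4**j)
--
--         kmer += [ index ]
--
--     return kmer
-- ===== SOURCE B (Python) =====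
-- def kmerDNA(seq, k=4):
--     # Rolling re-implementation: encode each k-window in base 4
--     # (little-endian, A=0 C=1 G=2 T=3), -1 for windows containing other chars.
--     # Natural domain: k >= 1 (a k-mer length).
--     n = len(seq)
--     if k > n:
--         return []  # no windows
--     code = {'A': 0, 'C': 1, 'G': 2, 'T': 3}
--     w = [code.get(c, -1) for c in seq]
--     top = 4 ** (k - 1)
--     run = 0      # length of the current all-ACGT run ending at pos
--     idx = 0      # base-4 index of the last min(run, k) chars of the run
--     pw = 1       # 4 ** min(run, k-1)
--     out = []
--     for pos in range(n):
--         v = w[pos]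
--         if v >= 0:
--             run += 1
--             if run < k:
--                 idx += v * pw
--                 pw *= 4
--             elif run == k:
--                 idx += v * top
--             else:
--                 idx = (idx - w[pos - k]) // 4 + v * top
--         else:
--             run = 0
--             idx = 0
--             pw = 1
--         if pos >= k - 1:
--             out.append(idx if run >= k else -1)
--     return out
-- ===== Notes on version B (the rewrite author's own statement) =====
-- stated objective: faster
-- what changed: replaced the per-window slice-and-re-encode (O(k) slicing and digit work per window) by a single rolling pass that updates the base-4 index incrementally, resetting at invalid characters
-- outside the precondition, e.g. on kmerDNA('AC', 0): A returns [0, 0, 0], B returns [0.0, -0.75]; on kmerDNA('CA', -1): A returns [1, 0, 0, 0], B raises IndexError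
import Mathlib
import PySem

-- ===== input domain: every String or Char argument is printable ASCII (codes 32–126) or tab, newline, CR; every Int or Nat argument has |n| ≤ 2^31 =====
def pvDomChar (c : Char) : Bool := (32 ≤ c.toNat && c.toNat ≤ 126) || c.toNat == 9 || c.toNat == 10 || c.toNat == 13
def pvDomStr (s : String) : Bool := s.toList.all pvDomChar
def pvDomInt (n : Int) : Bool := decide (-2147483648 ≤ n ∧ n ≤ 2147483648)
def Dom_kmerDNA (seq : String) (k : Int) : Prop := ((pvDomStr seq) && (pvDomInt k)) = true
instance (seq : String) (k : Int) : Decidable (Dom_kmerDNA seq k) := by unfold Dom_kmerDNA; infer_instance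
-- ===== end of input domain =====

-- B replaces A's per-window slice-and-re-encode by one rolling pass that updates the
-- base-4 index incrementally, resetting at invalid characters.

-- ===== PORT A =====
-- the inner 'for j,c in enumerate(nstr)' loop with its break (index = -1)
def kmerInner : List Char → Nat → Int → Int
  | [], _, index => index
  | c :: rest, j, index =>
    if c = 'A' then kmerInner rest (j + 1) (index + 0 * 4 ^ j)
    else if c = 'C' then kmerInner rest (j + 1) (index + 1 * 4 ^ j)
    else if c = 'G' then kmerInner rest (j + 1) (index + 2 * 4 ^ j)
    else if c = 'T' then kmerInner rest (j + 1) (index + 3 * 4 ^ j)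
    else -1

def kmerDNA (seq : String) (k : Int) : List Int :=
  (PySem.List.pyRange 0 (PySem.Str.len seq - k + 1)).foldl
    (fun kmer ell =>
      let nstr := PySem.Str.slice seq (some ell) (some (ell + k))
      kmer ++ [kmerInner nstr.toList 0 0]) []

-- ===== PORT B =====
def pvCode (c : Char) : Int :=   -- code.get(c, -1)
  if c = 'A' then 0 else if c = 'C' then 1 else if c = 'G' then 2 else if c = 'T' then 3 else -1

-- one iteration of Source B's 'for pos in range(n)' loop; state = (run, idx, pw, out)
def kmerDNAStep (k top : Int) (w : List Int)
    (st : Int × Int × Int × List Int) (pos : Int) : Int × Int × Int × List Int :=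
  let v := PySem.List.pyGetD w pos 0   -- w[pos]; index in range on the loop's domain
  let s :=
    if 0 ≤ v then
      let run := st.1 + 1
      if run < k then (run, st.2.1 + v * st.2.2.1, st.2.2.1 * 4, st.2.2.2)
      else if run = k then (run, st.2.1 + v * top, st.2.2.1, st.2.2.2)
      else (run,
        PySem.Int.floordiv (st.2.1 - PySem.List.pyGetD w (pos - k) 0) 4 + v * top,
        st.2.2.1, st.2.2.2)
    else (0, 0, 1, st.2.2.2)
  if pos ≥ k - 1 then (s.1, s.2.1, s.2.2.1, s.2.2.2 ++ [if s.1 ≥ k then s.2.1 else -1])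
  else s

def kmerDNA_alt (seq : String) (k : Int) : List Int :=
  if k > PySem.Str.len seq then []  -- no windows
  else
    -- top = 4 ** (k-1): exact for k ≥ 1 (Pre_); w = [code.get(c, -1) for c in seq]
    ((PySem.List.pyRange 0 (PySem.Str.len seq)).foldl
      (kmerDNAStep k (4 ^ (k - 1).toNat) (seq.toList.map pvCode)) (0, 0, 1, [])).2.2.2

-- ===== PRECONDITION & SPEC =====
-- Pre_ restricts to the natural k-mer domain k ≥ 1: for k ≤ 0 A's values are artefacts of
-- Python's negative-slice wraparound (e.g. non-empty windows for k < 0) and B does not return there.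
def Pre_kmerDNA (seq : String) (k : Int) : Prop := 1 ≤ k
instance (seq : String) (k : Int) : Decidable (Pre_kmerDNA seq k) := by unfold Pre_kmerDNA; infer_instance
def pvWitness_kmerDNA : String × Int := ("ACGT", 2)

def Spec_kmerDNA (seq : String) (k : Int) (out : List Int) : Prop := out = kmerDNA_alt seq k
instance (seq : String) (k : Int) (out : List Int) : Decidable (Spec_kmerDNA seq k out) := by unfold Spec_kmerDNA; infer_instance

-- ===== CLAIM (what is proved, stated in full; the proofs are below) =====
def Claim_equal_kmerDNA : Prop := ∀ (seq : String) (k : Int), Dom_kmerDNA seq k → Pre_kmerDNA seq k → Spec_kmerDNA seq k (kmerDNA seq k)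

-- ===== LEMMAS AND PROOFS =====

def pvIsKey (c : Char) : Bool := c = 'A' || c = 'C' || c = 'G' || c = 'T'

-- little-endian base-4 value of a list of digits (Horner form)
def pvEnc : List Int → Int
  | [] => 0
  | v :: r => v + 4 * pvEnc r

-- length of the maximal valid run ending just before position p (Source B's run)
def pvRun (cs : List Char) : Nat → Nat
  | 0 => 0
  | p + 1 => if pvIsKey (cs.getD p ' ') then pvRun cs p + 1 else 0

def pvWin (cs : List Char) (K ell : Nat) : List Char := (cs.drop ell).take K

-- value A assigns to the window starting at ell
def pvWinVal (cs : List Char) (K ell : Nat) : Int :=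
  if (pvWin cs K ell).all pvIsKey then pvEnc ((pvWin cs K ell).map pvCode) else -1

-- idx maintained by Source B after processing positions [0, p)
def pvIdxR (cs : List Char) (K p : Nat) : Int :=
  if pvRun cs p < K then
    pvEnc (((cs.map pvCode).drop (p - pvRun cs p)).take (pvRun cs p))
  else pvEnc (((cs.map pvCode).drop (p - K)).take K)

theorem pvCode_nonneg_iff (c : Char) : (0 ≤ pvCode c) ↔ (pvIsKey c = true) := by
  unfold pvCode pvIsKey
  split_ifs <;> simp_all <;> omega

theorem pvEnc_append (l : List Int) (v : Int) :
    pvEnc (l ++ [v]) = pvEnc l + 4 ^ l.length * v := by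
  induction l with
  | nil => simp [pvEnc]
  | cons a t ih => simp [pvEnc, ih, pow_succ]; ring

theorem pvFloordiv_four (x : Int) : PySem.Int.floordiv (4 * x) 4 = x := by
  rw [PySem.Int.floordiv_eq_ediv_of_pos (by norm_num)]
  exact Int.mul_ediv_cancel_left x (by norm_num)

theorem kmerInner_eq (l : List Char) (j : Nat) (index : Int) :
    kmerInner l j index =
      if l.all pvIsKey then index + 4 ^ j * pvEnc (l.map pvCode) else -1 := by
  induction l generalizing j index with
  | nil => simp [kmerInner, pvEnc]
  | cons c rest ih =>
    by_cases hA : c = 'A' <;> by_cases hC : c = 'C' <;> by_cases hG : c = 'G' <;>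
      by_cases hT : c = 'T' <;>
    simp only [kmerInner, hA, hC, hG, hT, if_true, if_false, ih, List.all_cons,
      List.map_cons, pvEnc, pvIsKey, pvCode] <;>
    first
      | (subst_vars; simp [pow_succ]; split <;> [ring; rfl])
      | simp_all

theorem pvRun_le (cs : List Char) (p : Nat) : pvRun cs p ≤ p := by
  induction p with
  | zero => simp [pvRun]
  | succ p ih => unfold pvRun; split <;> omega

theorem le_pvRun_iff (cs : List Char) (p m : Nat) :
    m ≤ pvRun cs p ↔
      (m ≤ p ∧ ∀ i, p - m ≤ i → i < p → pvIsKey (cs.getD i ' ') = true) := by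
  induction p generalizing m with
  | zero =>
    simp only [pvRun]
    constructor
    · intro h; exact ⟨h, fun i h1 h2 => absurd h2 (by omega)⟩
    · rintro ⟨h, -⟩; exact h
  | succ p ih =>
    unfold pvRun
    by_cases hv : pvIsKey (cs.getD p ' ') = true
    · rw [if_pos hv]
      cases m with
      | zero =>
        constructor
        · intro _; exact ⟨by omega, fun i h1 h2 => absurd h2 (by omega)⟩
        · intro _; omega
      | succ m =>
        rw [show m + 1 ≤ pvRun cs p + 1 ↔ m ≤ pvRun cs p from by omega, ih]
        constructor
        · rintro ⟨h1, h2⟩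
          refine ⟨by omega, fun i hi1 hi2 => ?_⟩
          rcases Nat.lt_succ_iff_lt_or_eq.mp hi2 with hi | rfl
          · exact h2 i (by omega) hi
          · exact hv
        · rintro ⟨h1, h2⟩
          exact ⟨by omega, fun i hi1 hi2 => h2 i (by omega) (by omega)⟩
    · rw [if_neg hv]
      cases m with
      | zero =>
        constructor
        · intro _; exact ⟨by omega, fun i h1 h2 => absurd h2 (by omega)⟩
        · intro _; omega
      | succ m =>
        constructor
        · intro h; omega
        · rintro ⟨h1, h2⟩
          exact absurd (h2 p (by omega) (by omega)) hv

theorem pvWin_all_iff (cs : List Char) (K ell : Nat) (h : ell + K ≤ cs.length) :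
    (pvWin cs K ell).all pvIsKey = true ↔
      ∀ i, ell ≤ i → i < ell + K → pvIsKey (cs.getD i ' ') = true := by
  unfold pvWin
  rw [List.all_eq_true]
  constructor
  · intro hall i h1 h2
    have hlen : i - ell < ((cs.drop ell).take K).length := by
      simp only [List.length_take, List.length_drop]; omega
    have h3 : i < cs.length := by omega
    have hget : ((cs.drop ell).take K)[i - ell]'hlen = cs[i]'h3 := by
      rw [List.getElem_take, List.getElem_drop]; congr 1; omega
    have hmem : cs[i]'h3 ∈ (cs.drop ell).take K := hget ▸ List.getElem_mem hlen
    have := hall _ hmem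
    rwa [List.getD_eq_getElem _ _ h3]
  · intro hva x hx
    obtain ⟨j, hj, rfl⟩ := List.mem_iff_getElem.mp hx
    have hj' : j < K ∧ ell + j < cs.length := by
      simp only [List.length_take, List.length_drop] at hj; omega
    have hget : ((cs.drop ell).take K)[j]'hj = cs[ell + j]'hj'.2 := by
      rw [List.getElem_take, List.getElem_drop]
    rw [hget]
    have := hva (ell + j) (by omega) (by omega)
    rwa [List.getD_eq_getElem _ _ hj'.2] at this

-- the window ending at position p is clean iff the run through p has length ≥ K
theorem pvRun_window_iff (cs : List Char) (K p : Nat) (hK : 1 ≤ K)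
    (hKp : K ≤ p + 1) (hp : p < cs.length) :
    (K ≤ pvRun cs (p + 1)) ↔ (pvWin cs K (p + 1 - K)).all pvIsKey = true := by
  rw [le_pvRun_iff, pvWin_all_iff cs K (p + 1 - K) (by omega)]
  constructor
  · rintro ⟨h1, h2⟩ i hi1 hi2; exact h2 i (by omega) (by omega)
  · intro h; exact ⟨hKp, fun i hi1 hi2 => h i (by omega) (by omega)⟩

theorem pvSeg_snoc (wl : List Int) (s r : Nat) (h : s + r < wl.length) :
    (wl.drop s).take (r + 1) = (wl.drop s).take r ++ [wl.getD (s + r) 0] := by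
  have hr : r < (wl.drop s).length := by rw [List.length_drop]; omega
  rw [List.take_succ, List.getElem?_eq_getElem hr, List.getElem_drop,
    List.getD_eq_getElem _ _ h]
  simp

theorem pvSeg_cons (wl : List Int) (K p : Nat) (hK : 1 ≤ K) (hKp : K ≤ p)
    (h : p - K < wl.length) :
    (wl.drop (p - K)).take K = wl.getD (p - K) 0 :: ((wl.drop (p - K + 1)).take (K - 1)) := by
  rw [List.drop_eq_getElem_cons h]
  obtain ⟨K', rfl⟩ : ∃ K', K = K' + 1 := ⟨K - 1, by omega⟩
  rw [List.take_succ_cons, List.getD_eq_getElem _ _ h]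
  simp

theorem pvGetD_map_code (cs : List Char) (p : Nat) (h : p < cs.length) :
    (cs.map pvCode).getD p 0 = pvCode (cs.getD p ' ') := by
  rw [List.getD_eq_getElem _ _ (by simpa using h), List.getD_eq_getElem _ _ h,
    List.getElem_map]

-- the rolling-pass invariant: Source B's state after processing positions [0, p)
theorem kmerDNA_alt_invariant (cs : List Char) (K : Nat) (hK : 1 ≤ K) :
    ∀ p, p ≤ cs.length →
      List.foldl (kmerDNAStep (K : Int) (4 ^ (K - 1)) (cs.map pvCode)) (0, 0, 1, [])
          ((List.range p).map (fun q : Nat => (q : Int))) =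
        ((pvRun cs p : Int), pvIdxR cs K p, (4 : Int) ^ min (pvRun cs p) (K - 1),
          (List.range (p + 1 - K)).map (pvWinVal cs K)) := by
  intro p
  induction p with
  | zero =>
    intro _
    have h1 : 0 + 1 - K = 0 := by omega
    have h2 : 0 < K := hK
    simp [pvRun, pvIdxR, pvEnc, h1, h2]
  | succ p ih =>
    intro hp
    have hpn : p < cs.length := hp
    have hwl : (cs.map pvCode).length = cs.length := by simp
    have hrp := pvRun_le cs p
    rw [List.range_succ, List.map_append, List.foldl_append, ih (Nat.le_of_succ_le hp)]
    simp only [List.map_cons, List.map_nil, List.foldl_cons, List.foldl_nil]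
    unfold kmerDNAStep
    simp only [PySem.List.pyGetD_natCast]
    rw [pvGetD_map_code cs p hpn]
    set r := pvRun cs p with hrdef
    by_cases hv : pvIsKey (cs.getD p ' ') = true
    · -- valid char: the run extends
      rw [if_pos ((pvCode_nonneg_iff _).mpr hv)]
      have hrun' : pvRun cs (p + 1) = r + 1 := by
        unfold pvRun; rw [if_pos hv]
      rcases Nat.lt_trichotomy (r + 1) K with hc | hc | hc
      · -- run still shorter than k: building phase
        rw [if_pos (by push_cast; omega : ((r : Int) + 1) < (K : Int))]
        have h2 : pvIdxR cs K p + pvCode (cs.getD p ' ') * (4 : Int) ^ min r (K - 1) =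
            pvIdxR cs K (p + 1) := by
          rw [pvIdxR, if_pos (by omega : r < K), pvIdxR, hrun',
            if_pos (by omega : r + 1 < K), Nat.min_eq_left (by omega),
            show p + 1 - (r + 1) = p - r from by omega,
            pvSeg_snoc (cs.map pvCode) (p - r) r (by omega),
            pvEnc_append, pvGetD_map_code cs (p - r + r) (by omega),
            show p - r + r = p from by omega]
          have hlen : (((cs.map pvCode).drop (p - r)).take r).length = r := by
            simp only [List.length_take, List.length_drop, hwl]; omega
          rw [hlen]; ring
        have h3 : (4 : Int) ^ min r (K - 1) * 4 = 4 ^ min (pvRun cs (p + 1)) (K - 1) := by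
          rw [hrun', Nat.min_eq_left (by omega), Nat.min_eq_left (by omega), pow_succ]
        by_cases hpos : ((p : Int)) ≥ (K : Int) - 1
        · rw [if_pos hpos, if_neg (by push_cast; omega : ¬ ((r : Int) + 1) ≥ (K : Int))]
          have hwval : pvWinVal cs K (p + 1 - K) = -1 := by
            rw [pvWinVal, if_neg]
            intro hall
            have := (pvRun_window_iff cs K p hK (by omega) hpn).mpr hall
            omega
          rw [show p + 1 + 1 - K = (p + 1 - K) + 1 from by omega, List.range_succ,
            List.map_append, List.map_cons, List.map_nil, hwval]
          exact Prod.ext (by push_cast [hrun']; ring) (Prod.ext h2 (Prod.ext h3 rfl))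
        · rw [if_neg hpos]
          rw [show p + 1 + 1 - K = 0 from by push_cast at hpos; omega,
            show p + 1 - K = 0 from by push_cast at hpos; omega] at *
          exact Prod.ext (by push_cast [hrun']; ring) (Prod.ext h2 (Prod.ext h3 rfl))
      · -- run reaches exactly k: first clean window of the run
        rw [if_neg (by push_cast; omega : ¬ ((r : Int) + 1) < (K : Int)),
          if_pos (by push_cast; omega : ((r : Int) + 1) = (K : Int))]
        have hKp1 : K ≤ p + 1 := by omega
        have h2 : pvIdxR cs K p + pvCode (cs.getD p ' ') * (4 : Int) ^ (K - 1) =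
            pvIdxR cs K (p + 1) := by
          rw [pvIdxR, if_pos (by omega : r < K), pvIdxR, hrun',
            if_neg (by omega : ¬ r + 1 < K),
            show p + 1 - K = p - r from by omega,
            show K = r + 1 from by omega,
            pvSeg_snoc (cs.map pvCode) (p - r) r (by omega),
            pvEnc_append, pvGetD_map_code cs (p - r + r) (by omega),
            show p - r + r = p from by omega]
          have hlen : (((cs.map pvCode).drop (p - r)).take r).length = r := by
            simp only [List.length_take, List.length_drop, hwl]; omega
          rw [hlen, show r + 1 - 1 = r from by omega]; ring
        have h3 : (4 : Int) ^ min r (K - 1) = 4 ^ min (pvRun cs (p + 1)) (K - 1) := by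
          rw [hrun', Nat.min_eq_left (by omega), Nat.min_eq_right (by omega),
            show r = K - 1 from by omega]
        rw [if_pos (by push_cast; omega : ((p : Int)) ≥ (K : Int) - 1),
          if_pos (by push_cast; omega : ((r : Int) + 1) ≥ (K : Int))]
        have hwval : pvWinVal cs K (p + 1 - K) = pvIdxR cs K (p + 1) := by
          have hall : (pvWin cs K (p + 1 - K)).all pvIsKey = true :=
            (pvRun_window_iff cs K p hK hKp1 hpn).mp (by omega)
          rw [pvWinVal, if_pos hall, pvWin, pvIdxR, hrun',
            if_neg (by omega : ¬ r + 1 < K)]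
          simp [List.map_take, List.map_drop]
        rw [show p + 1 + 1 - K = (p + 1 - K) + 1 from by omega, List.range_succ,
          List.map_append, List.map_cons, List.map_nil, hwval]
        exact Prod.ext (by push_cast [hrun']; ring) (Prod.ext h2 (Prod.ext h3 (by rw [h2])))
      · -- run longer than k: rolling update
        rw [if_neg (by push_cast; omega : ¬ ((r : Int) + 1) < (K : Int)),
          if_neg (by push_cast; omega : ¬ ((r : Int) + 1) = (K : Int))]
        have hKp : K ≤ p := by omega
        rw [show ((p : Int) - (K : Int)) = ((p - K : Nat) : Int) from by omega,
          PySem.List.pyGetD_natCast]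
        have hcons := pvSeg_cons (cs.map pvCode) K p hK hKp (by omega)
        have hidxp : pvIdxR cs K p = pvEnc (((cs.map pvCode).drop (p - K)).take K) := by
          rw [pvIdxR, if_neg (by omega : ¬ r < K)]
        have htl : pvEnc (((cs.map pvCode).drop (p - K + 1)).take (K - 1)) =
            PySem.Int.floordiv (pvIdxR cs K p - (cs.map pvCode).getD (p - K) 0) 4 := by
          rw [hidxp, hcons]
          simp only [pvEnc]
          rw [show ∀ a b : Int, a + 4 * b - a = 4 * b from fun a b => by ring,
            pvFloordiv_four]
        have hsnoc := pvSeg_snoc (cs.map pvCode) (p - K + 1) (K - 1) (by omega)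
        rw [show (K - 1) + 1 = K from by omega,
          show p - K + 1 + (K - 1) = p from by omega] at hsnoc
        have hlen : (((cs.map pvCode).drop (p - K + 1)).take (K - 1)).length = K - 1 := by
          simp only [List.length_take, List.length_drop, hwl]; omega
        have h2 : PySem.Int.floordiv (pvIdxR cs K p - (cs.map pvCode).getD (p - K) 0) 4 +
            pvCode (cs.getD p ' ') * (4 : Int) ^ (K - 1) = pvIdxR cs K (p + 1) := by
          rw [← htl, pvIdxR, hrun', if_neg (by omega : ¬ r + 1 < K),
            show p + 1 - K = p - K + 1 from by omega, hsnoc, pvEnc_append, hlen,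
            pvGetD_map_code cs p hpn]
          ring
        have h3 : (4 : Int) ^ min r (K - 1) = 4 ^ min (pvRun cs (p + 1)) (K - 1) := by
          rw [hrun', Nat.min_eq_right (by omega), Nat.min_eq_right (by omega)]
        rw [if_pos (by push_cast; omega : ((p : Int)) ≥ (K : Int) - 1),
          if_pos (by push_cast; omega : ((r : Int) + 1) ≥ (K : Int))]
        have hwval : pvWinVal cs K (p + 1 - K) = pvIdxR cs K (p + 1) := by
          have hall : (pvWin cs K (p + 1 - K)).all pvIsKey = true :=
            (pvRun_window_iff cs K p hK (by omega) hpn).mp (by omega)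
          rw [pvWinVal, if_pos hall, pvWin, pvIdxR, hrun',
            if_neg (by omega : ¬ r + 1 < K)]
          simp [List.map_take, List.map_drop]
        rw [show p + 1 + 1 - K = (p + 1 - K) + 1 from by omega, List.range_succ,
          List.map_append, List.map_cons, List.map_nil, hwval]
        exact Prod.ext (by push_cast [hrun']; ring) (Prod.ext h2 (Prod.ext h3 (by rw [h2])))
    · -- invalid char: the run resets
      rw [if_neg (fun h => hv ((pvCode_nonneg_iff _).mp h))]
      have hrun' : pvRun cs (p + 1) = 0 := by
        unfold pvRun; rw [if_neg hv]
      have h2 : (0 : Int) = pvIdxR cs K (p + 1) := by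
        rw [pvIdxR, hrun', if_pos (by omega : 0 < K)]
        simp [pvEnc]
      have h3 : (1 : Int) = (4 : Int) ^ min (pvRun cs (p + 1)) (K - 1) := by
        rw [hrun']; simp
      by_cases hpos : ((p : Int)) ≥ (K : Int) - 1
      · rw [if_pos hpos, if_neg (by push_cast; omega : ¬ ((0 : Int)) ≥ (K : Int))]
        have hwval : pvWinVal cs K (p + 1 - K) = -1 := by
          rw [pvWinVal, if_neg]
          intro hall
          have := (pvRun_window_iff cs K p hK (by push_cast at hpos; omega) hpn).mpr hall
          omega
        rw [show p + 1 + 1 - K = (p + 1 - K) + 1 from by push_cast at hpos; omega,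
          List.range_succ, List.map_append, List.map_cons, List.map_nil, hwval]
        exact Prod.ext (by rw [hrun']; rfl) (Prod.ext h2 (Prod.ext h3 rfl))
      · rw [if_neg hpos]
        rw [show p + 1 + 1 - K = 0 from by push_cast at hpos; omega,
          show p + 1 - K = 0 from by push_cast at hpos; omega] at *
        exact Prod.ext (by rw [hrun']; rfl) (Prod.ext h2 (Prod.ext h3 rfl))

theorem kmerDNA_alt_eq (seq : String) (k : Int) (hk : 1 ≤ k) :
    kmerDNA_alt seq k =
      (List.range (seq.toList.length + 1 - k.toNat)).map (pvWinVal seq.toList k.toNat) := by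
  obtain ⟨K, rfl⟩ : ∃ K : Nat, k = ((K : Nat) : Int) :=
    ⟨k.toNat, (Int.toNat_of_nonneg (by omega)).symm⟩
  unfold kmerDNA_alt
  by_cases hgt : ((K : Nat) : Int) > PySem.Str.len seq
  · rw [if_pos hgt]
    rw [PySem.Str.len_eq] at hgt
    have hlen : seq.toList.length < K := by exact_mod_cast hgt
    rw [Int.toNat_natCast, show seq.toList.length + 1 - K = 0 from by omega]
    simp
  · rw [if_neg hgt, PySem.Str.len_eq, PySem.List.pyRange_zero_natCast,
    show (((K : Int)) - 1).toNat = K - 1 from by omega, Int.toNat_natCast,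
    kmerDNA_alt_invariant seq.toList K (by exact_mod_cast hk) seq.toList.length (le_refl _)]

theorem kmerDNA_eq (seq : String) (k : Int) (hk : 1 ≤ k) :
    kmerDNA seq k =
      (List.range (seq.toList.length + 1 - k.toNat)).map (pvWinVal seq.toList k.toNat) := by
  unfold kmerDNA
  rw [PySem.List.foldl_append_singleton_eq_map, List.nil_append, PySem.Str.len_eq]
  have hkK : ((k.toNat : Nat) : Int) = k := Int.toNat_of_nonneg (by omega)
  by_cases hn : k.toNat ≤ seq.toList.length + 1
  · have harg : ((seq.toList.length : Int) - k + 1) =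
        ((seq.toList.length + 1 - k.toNat : Nat) : Int) := by omega
    rw [harg, PySem.List.pyRange_zero_natCast, List.map_map]
    apply List.map_congr_left
    intro q hq
    have hq' : q + k.toNat ≤ seq.toList.length := by
      rw [List.mem_range] at hq; omega
    simp only [Function.comp_apply]
    have hb : ((q : Int) + k) = (((q + k.toNat : Nat)) : Int) := by omega
    have hsl : (PySem.Str.slice seq (some (q : Int)) (some ((q : Int) + k))).toList =
        (seq.toList.drop q).take k.toNat := by
      rw [PySem.Str.toList_slice, PySem.Chars.slice_eq_listSlice, hb,
        PySem.List.slice_natCast, show q + k.toNat - q = k.toNat from by omega]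
    rw [hsl, kmerInner_eq]
    simp only [pvWinVal, pvWin, pow_zero, one_mul, zero_add]
  · have hempty : PySem.List.pyRange 0 ((seq.toList.length : Int) - k + 1) = [] := by
      apply List.eq_nil_iff_forall_not_mem.mpr
      intro x hx
      rw [PySem.List.mem_pyRange_one] at hx
      omega
    rw [hempty, show seq.toList.length + 1 - k.toNat = 0 from by omega]
    simp

-- ===== VERDICT (by name: the statement is the Claim_ definition above) =====
theorem kmerDNA_spec : Claim_equal_kmerDNA := by
  intro seq k _ hk
  unfold Spec_kmerDNA
  rw [kmerDNA_eq seq k hk, kmerDNA_alt_eq seq k hk]
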